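-- pv_equiv track=rewrite | github.com/betson-fernando/laudo-pericial | GlobalFuncs.py | listToText
-- ===== SOURCE A (Python) =====
-- def listToText(lst:list):
--
--     texto = ""
--     for num, item in enumerate(lst):
--         if num == len(lst) - 2:
--             texto += f"{item}, e "
--         elif num == len(lst) - 1:
--             texto += str(item)
--         else:
--             texto += f"{item}, "
--
--     return texto
-- ===== SOURCE B (Python) =====
-- def listToText(lst: list):
--     if not lst:
--         return ""
--     if len(lst) == 1:
--         return str(lst[0])
--     return ", ".join(str(x) for x in lst[:-1]) + ", e " + str(lst[-1])
-- ===== Notes on version B (the rewrite author's own statement) =====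
-- stated objective: simpler
-- what changed: Replaces the per-index branching inside A's enumerate loop (comparing each index against len-2 and len-1) by an up-front case split on the list length plus a single ', '.join of lst[:-1] with ', e ' + last element appended.
import Mathlib
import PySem

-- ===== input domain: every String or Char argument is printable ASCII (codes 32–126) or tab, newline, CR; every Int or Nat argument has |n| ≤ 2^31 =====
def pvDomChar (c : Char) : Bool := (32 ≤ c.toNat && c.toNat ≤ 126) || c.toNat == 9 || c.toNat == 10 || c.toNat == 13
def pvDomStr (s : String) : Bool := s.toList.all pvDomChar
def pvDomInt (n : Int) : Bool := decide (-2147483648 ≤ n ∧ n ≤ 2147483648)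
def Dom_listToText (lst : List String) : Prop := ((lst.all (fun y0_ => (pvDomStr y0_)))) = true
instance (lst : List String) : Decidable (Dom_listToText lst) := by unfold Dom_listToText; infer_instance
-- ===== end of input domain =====

-- B replaces the per-index branching (num == len-2 / len-1) inside A's enumerate loop by an
-- up-front length case split plus a join of lst[:-1] with ", " and an appended ", e " + last. (simpler)

-- ===== PORT A =====
def listToText (lst : List String) : String :=
  (PySem.List.enumerate lst).foldl
    (fun texto p =>
      if p.1 = (lst.length : Int) - 2 then texto ++ p.2 ++ ", e "
      else if p.1 = (lst.length : Int) - 1 then texto ++ p.2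
      else texto ++ p.2 ++ ", ") ""

-- ===== PORT B =====
def listToText_alt (lst : List String) : String :=
  match lst with
  | [] => ""
  | [x] => x
  | x :: y :: rest =>
      PySem.Str.join ", " ((x :: y :: rest).dropLast) ++ ", e " ++ ((x :: y :: rest).getLast (by simp))

-- ===== PRECONDITION & SPEC =====
def Spec_listToText (lst : List String) (out : String) : Prop := out = listToText_alt lst
instance (lst : List String) (out : String) : Decidable (Spec_listToText lst out) := by unfold Spec_listToText; infer_instance

-- ===== CLAIM (what is proved, stated in full; the proofs are below) =====
def Claim_equal_listToText : Prop := ∀ (lst : List String), Dom_listToText lst → Spec_listToText lst (listToText lst)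

-- ===== LEMMAS AND PROOFS =====

-- A's loop step only appends to the accumulator, so a prefix of the accumulator factors out.
theorem loop_acc (n : Int) (l : List (Int × String)) (a : String) : ∀ (b : String),
    l.foldl (fun texto p =>
      if p.1 = n - 2 then texto ++ p.2 ++ ", e "
      else if p.1 = n - 1 then texto ++ p.2
      else texto ++ p.2 ++ ", ") (a ++ b)
    = a ++ l.foldl (fun texto p =>
      if p.1 = n - 2 then texto ++ p.2 ++ ", e "
      else if p.1 = n - 1 then texto ++ p.2
      else texto ++ p.2 ++ ", ") b := by
  induction l with
  | nil => intro b; rfl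
  | cons p l ih =>
      intro b
      simp only [List.foldl_cons]
      split_ifs with hc1 hc2
      · rw [show ((a ++ b) ++ p.2 ++ ", e ") = a ++ (b ++ p.2 ++ ", e ") by
          simp [String.append_assoc]]
        exact ih _
      · rw [show ((a ++ b) ++ p.2) = a ++ (b ++ p.2) from String.append_assoc ..]
        exact ih _
      · rw [show ((a ++ b) ++ p.2 ++ ", ") = a ++ (b ++ p.2 ++ ", ") by
          simp [String.append_assoc]]
        exact ih _

-- Shifting both the start index and the length thresholds by one leaves the loop unchanged.
theorem loop_shift (l : List String) (n : Int) : ∀ (s : Int) (b : String),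
    (PySem.List.enumerate l (s+1)).foldl (fun texto p =>
      if p.1 = (n+1) - 2 then texto ++ p.2 ++ ", e "
      else if p.1 = (n+1) - 1 then texto ++ p.2
      else texto ++ p.2 ++ ", ") b
    = (PySem.List.enumerate l s).foldl (fun texto p =>
      if p.1 = n - 2 then texto ++ p.2 ++ ", e "
      else if p.1 = n - 1 then texto ++ p.2
      else texto ++ p.2 ++ ", ") b := by
  induction l with
  | nil => intro s b; rfl
  | cons x l ih =>
      intro s b
      simp only [PySem.List.enumerate_cons, List.foldl_cons]
      have h2 : (s + 1 = n + 1 - 2) ↔ (s = n - 2) := by omega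
      have h1 : (s + 1 = n + 1 - 1) ↔ (s = n - 1) := by omega
      simp only [h2, h1]
      split_ifs <;> exact ih _ _

theorem listToText_single (x : String) : listToText [x] = x := by
  simp [listToText, PySem.List.enumerate]

theorem listToText_pair (x y : String) : listToText [x, y] = x ++ ", e " ++ y := by
  simp [listToText, PySem.List.enumerate]

-- Peeling the head off a list of length ≥ 3 in A's loop.
theorem listToText_cons3 (x y z : String) (rest : List String) :
    listToText (x :: y :: z :: rest) = x ++ ", " ++ listToText (y :: z :: rest) := by
  unfold listToText
  conv_lhs => rw [PySem.List.enumerate_cons, List.foldl_cons]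
  simp only [List.length_cons, Nat.cast_add, Nat.cast_one]
  rw [if_neg (by omega), if_neg (by omega)]
  rw [show ((0:Int)+1) = (0+1) from rfl]
  rw [loop_shift (y :: z :: rest) ((rest.length : Int) + 1 + 1) 0]
  rw [show ("" ++ x ++ ", ") = (x ++ ", ") ++ "" by simp]
  rw [loop_acc]

-- The same peeling for B's join.
theorem alt_cons3 (x y z : String) (rest : List String) :
    listToText_alt (x :: y :: z :: rest) = x ++ ", " ++ listToText_alt (y :: z :: rest) := by
  have hsep : ∀ (J : List Char), String.ofList (',' :: ' ' :: J) = ", " ++ String.ofList J := by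
    intro J
    rw [show (',' :: ' ' :: J) = [',', ' '] ++ J from rfl, String.ofList_append]
  simp [listToText_alt, PySem.Str.join, PySem.Chars.join_cons_cons,
    String.ofList_append, String.ofList_toList, String.append_assoc, hsep]

theorem equal_all (lst : List String) : listToText lst = listToText_alt lst := by
  induction lst with
  | nil => rfl
  | cons x rest ih =>
      match rest with
      | [] => simp [listToText_single, listToText_alt]
      | [y] =>
          rw [listToText_pair]
          simp [listToText_alt, PySem.Str.join, PySem.Chars.join_singleton, String.ofList_toList]
      | y :: z :: t =>
          rw [listToText_cons3, alt_cons3, ih]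

-- ===== VERDICT (by name: the statement is the Claim_ definition above) =====
theorem listToText_spec : Claim_equal_listToText := by
  intro lst _
  unfold Spec_listToText
  exact equal_all lst
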